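-- pv_equiv track=rewrite | github.com/coder-leo-bian/Homework | homework03/best_short_distance.py | best_short_distance
-- ===== SOURCE A (Python) =====
-- def best_short_distance(start, index):
--     pathes = [[start]]
--     closed = []
--     all_path = []
--     while pathes:
--         path = pathes.pop(0)
--         current_path = path[-1]
--         for i in index:
--             if current_path == i: continue
--             elif current_path in path[: -1]: continue
--             elif i in path: continue
--             else: pass
--             new_path = path + [i]
--             pathes.append(new_path)
--             if len(new_path) == len(index):
--                 all_path.append(new_path)
--     return all_path
-- ===== SOURCE B (Python) =====
-- def best_short_distance(start, index):
--     n = len(index)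
--     result = []
--
--     def dfs(path):
--         for i in index:
--             if i not in path:
--                 new = path + [i]
--                 if len(new) == n:
--                     result.append(new)
--                 else:
--                     dfs(new)
--
--     dfs([start])
--     return result
-- ===== Notes on version B (the rewrite author's own statement) =====
-- stated objective: simpler
-- what changed: A's explicit FIFO-queue breadth-first enumeration (which keeps exploring paths past full length) is replaced by a short recursive depth-first search that collects a path the moment it reaches len(index) and prunes there; all collected paths sit at the same depth, so the DFS leaf order equals A's BFS order.
import Mathlib
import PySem

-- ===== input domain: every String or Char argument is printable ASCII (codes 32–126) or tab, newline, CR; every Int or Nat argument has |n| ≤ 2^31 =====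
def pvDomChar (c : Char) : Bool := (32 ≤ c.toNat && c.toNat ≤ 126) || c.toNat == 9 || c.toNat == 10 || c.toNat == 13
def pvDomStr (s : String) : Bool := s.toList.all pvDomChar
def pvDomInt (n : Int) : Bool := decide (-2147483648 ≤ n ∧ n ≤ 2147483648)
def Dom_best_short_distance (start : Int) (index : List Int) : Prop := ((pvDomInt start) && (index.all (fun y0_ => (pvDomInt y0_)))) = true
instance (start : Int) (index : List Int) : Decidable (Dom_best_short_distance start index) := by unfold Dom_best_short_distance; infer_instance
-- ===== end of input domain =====

-- B replaces A's explicit FIFO-queue breadth-first enumeration by a recursive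
-- depth-first search that prunes as soon as a path reaches full length (simpler,
-- and it skips the dead exploration A performs past that depth).

-- ===== PORT A =====
-- the while-loop over the queue `pathes`; the Nat argument is fuel, a pure
-- totality guard (a generous bound on the number of pops; the loop itself
-- stops when the queue is empty and the fuel is proved sufficient below)
def bsdLoopA (index : List Int) : Nat → List (List Int) → List (List Int) → List (List Int)
  | 0, _, all => all
  | _ + 1, [], all => all                     -- while pathes: … exits
  | f + 1, path :: rest, all =>               -- path = pathes.pop(0)
    match PySem.List.pyGet? path (-1) with    -- current_path = path[-1]
    | none => all                             -- IndexError on an empty path; unreachable from the entry point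
    | some cur =>
      let st := index.foldl (fun (st : List (List Int) × List (List Int)) i =>
        if cur = i then st                                    -- if current_path == i: continue
        else if path.dropLast.contains cur then st            -- elif current_path in path[:-1]: continue
        else if path.contains i then st                       -- elif i in path: continue
        else
          (st.1 ++ [path ++ [i]],                             -- pathes.append(new_path)
           if (path ++ [i]).length = index.length then st.2 ++ [path ++ [i]] else st.2))
        (rest, all)
      bsdLoopA index f st.1 st.2

def best_short_distance (start : Int) (index : List Int) : List (List Int) :=
  bsdLoopA index ((index.length + 2) ^ (index.length + 2)) [[start]] []

-- ===== PORT B =====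
-- the recursive dfs helper of Source B; the Nat argument is fuel, a pure totality
-- guard (recursion depth is bounded by the number of distinct values, proved below)
def bsdDfsB (index : List Int) : Nat → List Int → List (List Int)
  | 0, _ => []
  | f + 1, path =>
    index.flatMap (fun i =>                                   -- for i in index:
      if path.contains i then []                              -- if i not in path:
      else if (path ++ [i]).length = index.length then [path ++ [i]]   -- result.append(new)
      else bsdDfsB index f (path ++ [i]))                     -- dfs(new)

def best_short_distance_alt (start : Int) (index : List Int) : List (List Int) :=
  bsdDfsB index (index.length + 2) [start]

-- ===== PRECONDITION & SPEC =====
def Spec_best_short_distance (start : Int) (index : List Int) (out : List (List Int)) : Prop := out = best_short_distance_alt start index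
instance (start : Int) (index : List Int) (out : List (List Int)) : Decidable (Spec_best_short_distance start index out) := by unfold Spec_best_short_distance; infer_instance

-- ===== CLAIM (what is proved, stated in full; the proofs are below) =====
def Claim_equal_best_short_distance : Prop := ∀ (start : Int) (index : List Int), Dom_best_short_distance start index → Spec_best_short_distance start index (best_short_distance start index)

-- ===== LEMMAS AND PROOFS =====

-- the list of child paths A pushes / B recurses on from `p`
def bsdChildren (index : List Int) (p : List Int) : List (List Int) :=
  (index.filter (fun i => !p.contains i)).map (fun i => p ++ [i])

-- size of the exploration tree rooted at p (= number of queue pops it causes)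
def bsdSize (start : Int) (index : List Int) (p : List Int) : Nat :=
  if h : p.Nodup ∧ p ⊆ start :: index then
    1 + ((index.filter (fun i => !p.contains i)).attach.map
          (fun i => bsdSize start index (p ++ [i.1]))).sum
  else 1
termination_by index.length + 2 - p.length
decreasing_by
  have hle : p.length ≤ (start :: index).length := (h.1.subperm h.2).length_le
  simp at hle ⊢
  omega

lemma bsdSize_pos (start : Int) (index : List Int) (p : List Int) :
    1 ≤ bsdSize start index p := by
  rw [bsdSize]; split <;> omega

lemma bsdSize_eq (start : Int) (index : List Int) (p : List Int)
    (h : p.Nodup ∧ p ⊆ start :: index) :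
    bsdSize start index p
      = 1 + ((bsdChildren index p).map (bsdSize start index)).sum := by
  rw [bsdSize, dif_pos h]
  simp [bsdChildren, List.map_map, Function.comp_def]

-- B's dfs returns [] on any path already at full length (deeper paths only grow)
lemma bsdDfsB_dead (index : List Int) :
    ∀ (f : Nat) (p : List Int), index.length ≤ p.length → bsdDfsB index f p = [] := by
  intro f
  induction f with
  | zero => intro p _; rfl
  | succ f ih =>
    intro p hp
    show index.flatMap _ = []
    rw [List.flatMap_eq_nil_iff]
    intro i hi
    by_cases hmem : i ∈ p
    · simp [hmem]
    · rw [if_neg (by simpa using hmem)]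
      rw [if_neg (show ¬(p ++ [i]).length = index.length by simp; omega)]
      exact ih _ (by simp; omega)

-- the result of B's dfs does not depend on the fuel once it covers the depth left
lemma bsdDfsB_fuel (start : Int) (index : List Int) :
    ∀ (f g : Nat) (p : List Int), p.Nodup → p ⊆ start :: index →
      index.length + 2 ≤ f + p.length → index.length + 2 ≤ g + p.length →
      bsdDfsB index f p = bsdDfsB index g p := by
  intro f
  induction f with
  | zero =>
    intro g p hnd hsub hf _
    have := (hnd.subperm hsub).length_le
    simp at this; omega
  | succ f ih =>
    intro g p hnd hsub hf hg
    have hplen := (hnd.subperm hsub).length_le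
    simp at hplen
    obtain ⟨g', rfl⟩ : ∃ g', g = g' + 1 := ⟨g - 1, by omega⟩
    show index.flatMap _ = index.flatMap _
    apply List.flatMap_congr
    intro i hi
    by_cases hmem : i ∈ p
    · simp [hmem]
    · have hc : p.contains i = false := by simpa using hmem
      simp only [hc, Bool.false_eq_true, if_false]
      by_cases hlen : (p ++ [i]).length = index.length
      · simp only [if_pos hlen]
      · simp only [if_neg hlen]
        apply ih
        · exact hnd.append (by simp) (by simpa using fun h => hmem (by simpa using h))
        · intro x hx
          rcases List.mem_append.1 hx with h | h
          · exact hsub h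
          · simp at h; subst h; exact List.mem_cons_of_mem _ hi
        · simp; omega
        · simp; omega

-- a guarded flatMap is a flatMap over the filtered list
lemma bsdFilterFlat (l : List Int) (q : Int → Bool) (F : Int → List (List Int)) :
    l.flatMap (fun i => if q i then [] else F i)
      = (l.filter (fun i => !q i)).flatMap F := by
  induction l with
  | nil => rfl
  | cons x xs ih => by_cases hq : q x <;> simp [hq, ih]

-- one unfolding of B's dfs: the collected children, then the recursive blocks
lemma bsdDfsB_step (start : Int) (index : List Int) (p : List Int)
    (hnd : p.Nodup) (hsub : p ⊆ start :: index) :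
    bsdDfsB index (index.length + 2) p
      = (if p.length + 1 = index.length then bsdChildren index p else [])
        ++ (bsdChildren index p).flatMap (bsdDfsB index (index.length + 2)) := by
  have hunfold : bsdDfsB index (index.length + 2) p
      = index.flatMap (fun i =>
          if p.contains i then []
          else if (p ++ [i]).length = index.length then [p ++ [i]]
          else bsdDfsB index (index.length + 1) (p ++ [i])) := rfl
  by_cases h : p.length + 1 = index.length
  · have h1 : (fun i =>
        if p.contains i then ([] : List (List Int))
        else if (p ++ [i]).length = index.length then [p ++ [i]]
        else bsdDfsB index (index.length + 1) (p ++ [i]))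
        = fun i => if p.contains i then [] else [p ++ [i]] := by
      funext i
      rw [if_pos (show (p ++ [i]).length = index.length by simp; omega)]
    have h2 : (bsdChildren index p).flatMap (bsdDfsB index (index.length + 2)) = [] := by
      rw [List.flatMap_eq_nil_iff]
      intro c hc
      simp [bsdChildren] at hc
      obtain ⟨i, _, rfl⟩ := hc
      exact bsdDfsB_dead index _ _ (by simp; omega)
    rw [hunfold, h1, bsdFilterFlat, if_pos h, h2, List.append_nil, bsdChildren]
    exact Eq.symm List.map_eq_flatMap
  · have h1 : (fun i =>
        if p.contains i then ([] : List (List Int))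
        else if (p ++ [i]).length = index.length then [p ++ [i]]
        else bsdDfsB index (index.length + 1) (p ++ [i]))
        = fun i => if p.contains i then []
                   else bsdDfsB index (index.length + 1) (p ++ [i]) := by
      funext i
      rw [if_neg (show ¬(p ++ [i]).length = index.length by simp; omega)]
    rw [hunfold, h1, bsdFilterFlat, if_neg h, List.nil_append, bsdChildren, List.flatMap_map]
    apply List.flatMap_congr
    intro i hi
    simp only [List.mem_filter] at hi
    apply bsdDfsB_fuel start index
    · refine hnd.append (by simp) ?_
      intro x hx hx2
      simp at hx2
      subst hx2
      exact (by simpa using hi.2 : x ∉ p) hx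
    · intro x hx
      rcases List.mem_append.1 hx with hx | hx
      · exact hsub hx
      · have hxi : x = i := by simpa using hx
        subst hxi
        exact List.mem_cons_of_mem _ hi.1
    · have hl2 : (p ++ [i]).length = p.length + 1 := by simp
      omega
    · have hl2 : (p ++ [i]).length = p.length + 1 := by simp
      omega

-- A's inner for-loop as a fold: it appends the children to the queue and the
-- full-length children to the accumulator
lemma bsdFold (index : List Int) (p : List Int) (cur : Int)
    (hnd : p.Nodup) (hcur : p.dropLast ++ [cur] = p) :
    ∀ (l : List Int) (a b : List (List Int)),
      l.foldl (fun (st : List (List Int) × List (List Int)) i =>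
        if cur = i then st
        else if p.dropLast.contains cur then st
        else if p.contains i then st
        else
          (st.1 ++ [p ++ [i]],
           if (p ++ [i]).length = index.length then st.2 ++ [p ++ [i]] else st.2)) (a, b)
      = (a ++ (l.filter (fun i => !p.contains i)).map (fun i => p ++ [i]),
         b ++ if p.length + 1 = index.length
              then (l.filter (fun i => !p.contains i)).map (fun i => p ++ [i]) else []) := by
  have hm : cur ∈ p := by rw [← hcur]; simp
  have hdl : ¬ p.dropLast.contains cur := by
    rw [List.contains_iff_mem]
    rw [← hcur] at hnd
    exact fun hmem => (List.disjoint_of_nodup_append hnd) hmem (by simp)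
  intro l
  induction l with
  | nil => simp
  | cons x xs ih =>
    intro a b
    rw [List.foldl_cons]
    by_cases hx : cur = x
    · have hcx : p.contains x = true := by subst hx; exact List.contains_iff_mem.2 hm
      simp only [if_pos hx, ih, List.filter_cons, hcx, Bool.not_true]
      simp
    · rw [if_neg hx, if_neg (by simpa using hdl)]
      by_cases hpx : p.contains x
      · simp only [ih, List.filter_cons, hpx, Bool.not_true]
        simp
      · simp only [ih, List.filter_cons, hpx]
        have hlen : ((p ++ [x]).length = index.length) ↔ (p.length + 1 = index.length) := by
          simp
        by_cases hl : p.length + 1 = index.length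
        · simp [hlen.2 hl, hl, List.append_assoc]
        · simp [hl]

-- size of the whole queue = remaining number of pops; the bound used as fuel
lemma bsdSize_le (start : Int) (index : List Int) :
    ∀ (m : Nat) (p : List Int), index.length + 2 - p.length ≤ m →
      bsdSize start index p ≤ (index.length + 2) ^ (index.length + 2 - p.length) := by
  intro m
  induction m with
  | zero =>
    intro p hm
    rw [bsdSize]
    split
    · rename_i h
      have := (h.1.subperm h.2).length_le
      simp at this; omega
    · exact Nat.one_le_pow _ _ (by omega)
  | succ m ih =>
    intro p hm
    rw [bsdSize]
    split
    · rename_i h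
      have hplen : p.length ≤ index.length + 1 := by
        have := (h.1.subperm h.2).length_le
        simpa using this
      set e := index.length + 2 - p.length with he
      have he1 : 1 ≤ e := by omega
      have hsum : ((index.filter (fun i => !p.contains i)).attach.map
            (fun i => bsdSize start index (p ++ [i.1]))).sum
          ≤ index.length * (index.length + 2) ^ (e - 1) := by
        have hb : ∀ x ∈ (index.filter (fun i => !p.contains i)).attach.map
            (fun i => bsdSize start index (p ++ [i.1])),
            x ≤ (index.length + 2) ^ (e - 1) := by
          intro x hx
          simp only [List.mem_map] at hx
          obtain ⟨i, _, rfl⟩ := hx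
          have := ih (p ++ [i.1]) (by simp; omega)
          have he2 : e - 1 = index.length + 1 - p.length := by omega
          rw [he2]
          simpa using this
        have := List.sum_le_card_nsmul _ _ hb
        have hlen2 : ((index.filter (fun i => !p.contains i)).attach.map
            (fun i => bsdSize start index (p ++ [i.1]))).length ≤ index.length := by
          simpa using List.length_filter_le _ _
        calc _ ≤ _ := this
        _ ≤ index.length * (index.length + 2) ^ (e - 1) := by
            simp only [smul_eq_mul]
            exact Nat.mul_le_mul_right _ hlen2
      have hX : 1 ≤ (index.length + 2) ^ (e - 1) := Nat.one_le_pow _ _ (by omega)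
      have hpow : (index.length + 2) ^ e = (index.length + 2) ^ (e - 1) * (index.length + 2) := by
        conv_lhs => rw [show e = (e - 1) + 1 by omega]
        rw [pow_succ]
      rw [hpow]
      nlinarith [hsum, hX]
    · exact Nat.one_le_pow _ _ (by omega)

-- path[-1] of a nonempty path: the last element, which closes the path on the left
lemma bsdLast (p : List Int) (h : p ≠ []) :
    ∃ c, PySem.List.pyGet? p (-1) = some c ∧ p.dropLast ++ [c] = p := by
  refine ⟨p.getLast h, ?_, List.dropLast_append_getLast h⟩
  have h1 : PySem.List.pyGet? p (-1) = p.getLast? := by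
    simp [PySem.List.pyGet?, PySem.List.pyIdx?]
    rw [if_pos (by simpa [Nat.one_le_iff_ne_zero, List.length_eq_zero_iff] using h)]
    simp [List.getLast?_eq_getElem?]
  rw [h1]
  exact List.getLast?_eq_some_getLast h

-- one iteration of A's while-loop: pop p, push its children, collect the full ones
lemma bsdLoopA_cons (index : List Int) (f : Nat) (p : List Int)
    (rest all : List (List Int)) (cur : Int)
    (hcur : PySem.List.pyGet? p (-1) = some cur)
    (hnd : p.Nodup) (hsplit : p.dropLast ++ [cur] = p) :
    bsdLoopA index (f + 1) (p :: rest) all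
      = bsdLoopA index f (rest ++ bsdChildren index p)
          (all ++ if p.length + 1 = index.length then bsdChildren index p else []) := by
  have hfold := bsdFold index p cur hnd hsplit index rest all
  rw [bsdLoopA, hcur]
  simp only [hfold, bsdChildren]

-- the central invariant: running A's queue loop on a two-level queue collects,
-- in order, the DFS harvests of the deeper level then of the shallower one
lemma bsdMain (start : Int) (index : List Int) :
    ∀ (fuel : Nat) (L : Nat) (low high acc : List (List Int)),
      (∀ p ∈ low, (p.Nodup ∧ p ⊆ start :: index ∧ p ≠ []) ∧ p.length = L) →
      (∀ p ∈ high, (p.Nodup ∧ p ⊆ start :: index ∧ p ≠ []) ∧ p.length = L + 1) →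
      (((low ++ high).map (bsdSize start index)).sum ≤ fuel) →
      bsdLoopA index fuel (low ++ high) acc
        = acc ++ high.flatMap (bsdDfsB index (index.length + 2))
              ++ low.flatMap (bsdDfsB index (index.length + 2)) := by
  intro fuel
  induction fuel with
  | zero =>
    intro L low high acc hlow hhigh hsz
    have hnil : low ++ high = [] := by
      cases hq : low ++ high with
      | nil => rfl
      | cons q qrest =>
        rw [hq, List.map_cons, List.sum_cons] at hsz
        have := bsdSize_pos start index q
        omega
    obtain ⟨h1, h2⟩ := List.append_eq_nil_iff.1 hnil
    subst h1; subst h2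
    simp [bsdLoopA]
  | succ f ih =>
    intro L low high acc hlow hhigh hsz
    cases low with
    | nil =>
      cases high with
      | nil => simp [bsdLoopA]
      | cons p h' =>
        obtain ⟨⟨hnd, hsub, hne⟩, hlen⟩ := hhigh p (by simp)
        obtain ⟨cur, hcur, hsplit⟩ := bsdLast p hne
        have hh' : ∀ q ∈ h', (q.Nodup ∧ q ⊆ start :: index ∧ q ≠ []) ∧ q.length = L + 1 :=
          fun q hq => hhigh q (by simp [hq])
        have hch : ∀ q ∈ bsdChildren index p,
            (q.Nodup ∧ q ⊆ start :: index ∧ q ≠ []) ∧ q.length = (L + 1) + 1 := by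
          intro q hq
          simp only [bsdChildren, List.mem_map, List.mem_filter] at hq
          obtain ⟨i, ⟨hi, hip⟩, rfl⟩ := hq
          have hip' : i ∉ p := by simpa using hip
          refine ⟨⟨hnd.append (by simp) ?_, ?_, by simp⟩, by simp [hlen]⟩
          · intro x hx hx2
            have hxi : x = i := by simpa using hx2
            subst hxi; exact hip' hx
          · intro x hx
            rcases List.mem_append.1 hx with hx | hx
            · exact hsub hx
            · have hxi : x = i := by simpa using hx
              subst hxi; exact List.mem_cons_of_mem _ hi
        have hsz' : ((h' ++ bsdChildren index p).map (bsdSize start index)).sum ≤ f := by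
          simp only [List.nil_append, List.map_cons, List.sum_cons] at hsz
          rw [List.map_append, List.sum_append]
          have heq := bsdSize_eq start index p ⟨hnd, hsub⟩
          omega
        rw [List.nil_append,
            bsdLoopA_cons index f p h' acc cur hcur hnd hsplit,
            ih (L + 1) h' (bsdChildren index p) _ hh' hch hsz',
            List.flatMap_cons, bsdDfsB_step start index p hnd hsub]
        simp [List.append_assoc]
    | cons p low' =>
      obtain ⟨⟨hnd, hsub, hne⟩, hlen⟩ := hlow p (by simp)
      obtain ⟨cur, hcur, hsplit⟩ := bsdLast p hne
      have hlow' : ∀ q ∈ low', (q.Nodup ∧ q ⊆ start :: index ∧ q ≠ []) ∧ q.length = L :=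
        fun q hq => hlow q (by simp [hq])
      have hch : ∀ q ∈ bsdChildren index p,
          (q.Nodup ∧ q ⊆ start :: index ∧ q ≠ []) ∧ q.length = L + 1 := by
        intro q hq
        simp only [bsdChildren, List.mem_map, List.mem_filter] at hq
        obtain ⟨i, ⟨hi, hip⟩, rfl⟩ := hq
        have hip' : i ∉ p := by simpa using hip
        refine ⟨⟨hnd.append (by simp) ?_, ?_, by simp⟩, by simp [hlen]⟩
        · intro x hx hx2
          have hxi : x = i := by simpa using hx2
          subst hxi; exact hip' hx
        · intro x hx
          rcases List.mem_append.1 hx with hx | hx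
          · exact hsub hx
          · have hxi : x = i := by simpa using hx
            subst hxi; exact List.mem_cons_of_mem _ hi
      have hhc : ∀ q ∈ high ++ bsdChildren index p,
          (q.Nodup ∧ q ⊆ start :: index ∧ q ≠ []) ∧ q.length = L + 1 := by
        intro q hq
        rcases List.mem_append.1 hq with hq | hq
        · exact hhigh q hq
        · exact hch q hq
      have hsz' : ((low' ++ (high ++ bsdChildren index p)).map (bsdSize start index)).sum ≤ f := by
        simp only [List.cons_append, List.map_cons, List.sum_cons, List.map_append,
          List.sum_append] at hsz ⊢
        have heq := bsdSize_eq start index p ⟨hnd, hsub⟩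
        omega
      have hq1 : (p :: low') ++ high = p :: (low' ++ high) := by simp
      have hq2 : (low' ++ high) ++ bsdChildren index p = low' ++ (high ++ bsdChildren index p) := by
        simp
      rw [hq1, bsdLoopA_cons index f p (low' ++ high) acc cur hcur hnd hsplit, hq2,
          ih L low' (high ++ bsdChildren index p) _ hlow' hhc hsz',
          List.flatMap_cons, List.flatMap_append, bsdDfsB_step start index p hnd hsub]
      by_cases hcol : p.length + 1 = index.length
      · have hhd : high.flatMap (bsdDfsB index (index.length + 2)) = [] := by
          rw [List.flatMap_eq_nil_iff]
          intro q hq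
          exact bsdDfsB_dead index _ q (by rw [(hhigh q hq).2]; omega)
        rw [if_pos hcol, hhd]
        simp [List.append_assoc]
      · rw [if_neg hcol]
        simp [List.append_assoc]

-- ===== VERDICT (by name: the statement is the Claim_ definition above) =====
theorem best_short_distance_spec : Claim_equal_best_short_distance := by
  intro start index _
  show best_short_distance start index = best_short_distance_alt start index
  have h := bsdMain start index ((index.length + 2) ^ (index.length + 2)) 1
    [[start]] [] [] (by simp) (by simp) ?_
  · simpa [best_short_distance, best_short_distance_alt] using h
  · have := bsdSize_le start index (index.length + 2) [start] (by simp)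
    have hp : (index.length + 2) ^ (index.length + 2 - 1) ≤ (index.length + 2) ^ (index.length + 2) :=
      Nat.pow_le_pow_right (by omega) (by omega)
    simpa using le_trans this hp
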